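-- pv_equiv track=rewrite | github.com/nick-silantro/substrate-test | _system/scripts/update-entity.py | remove_recurrence_sub_attr
-- ===== SOURCE A (Python) =====
-- def remove_recurrence_sub_attr(content, attr_name):
--     """Remove a 2-space-indented sub-attribute from inside the recurrence: block."""
--     lines = content.rstrip('\n').split('\n')
--     new_lines = []
--     skip_continuation = False
--     i = 0
--     while i < len(lines):
--         line = lines[i]
--         if skip_continuation:
--             # Continuation = 3+ spaces (deeper than 2-space attribute indent)
--             if line.startswith("   "):
--                 i += 1
--                 continue
--             else:
--                 skip_continuation = False
--         stripped = line.lstrip()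
--         if (line.startswith("  ") and not line.startswith("   ")
--                 and stripped.startswith(f"{attr_name}:")
--                 and not stripped.startswith(f"{attr_name}s:")):
--             skip_continuation = True
--             i += 1
--             continue
--         new_lines.append(line)
--         i += 1
--     return '\n'.join(new_lines) + '\n'
-- ===== SOURCE B (Python) =====
-- def remove_recurrence_sub_attr(content, attr_name):
--     """Staged pipeline: group lines into indentation blocks, drop blocks headed by
--     the matching 2-space attribute, flatten the survivors."""
--     def is_header(line):
--         s = line.lstrip()
--         return (line.startswith("  ") and not line.startswith("   ")
--                 and s.startswith(attr_name + ":")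
--                 and not s.startswith(attr_name + "s:"))
--     blocks = [[]]
--     for line in content.rstrip('\n').split('\n'):
--         if line.startswith("   "):
--             blocks[-1].append(line)
--         else:
--             blocks.append([line])
--     kept = [b for b in blocks if not (b and is_header(b[0]))]
--     return '\n'.join(line for b in kept for line in b) + '\n'
-- ===== Notes on version B (the rewrite author's own statement) =====
-- stated objective: alternative
-- what changed: Replaced A's single stateful scan (skip_continuation flag) by a three-stage pipeline: group the lines into indentation blocks (a head line plus its 3+-space continuations), filter out blocks headed by the matching attribute, and flatten the kept blocks.
import Mathlib
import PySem

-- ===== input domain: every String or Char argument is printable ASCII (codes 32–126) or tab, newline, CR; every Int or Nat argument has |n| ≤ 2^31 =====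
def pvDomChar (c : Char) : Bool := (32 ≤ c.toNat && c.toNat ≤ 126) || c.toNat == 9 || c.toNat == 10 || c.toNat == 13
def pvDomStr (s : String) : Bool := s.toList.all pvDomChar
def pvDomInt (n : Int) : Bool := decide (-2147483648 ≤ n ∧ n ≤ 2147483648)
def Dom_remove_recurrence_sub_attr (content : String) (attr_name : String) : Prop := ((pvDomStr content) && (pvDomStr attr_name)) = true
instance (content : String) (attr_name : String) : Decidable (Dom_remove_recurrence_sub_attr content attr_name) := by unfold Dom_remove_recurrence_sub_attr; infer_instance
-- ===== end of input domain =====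

-- B replaces A's stateful scan by a block-group / filter / flatten pipeline (objective: alternative).
-- content.rstrip('\n'): drop trailing '\n' characters (exact hand port; PySem has no rstrip-with-chars)
def pvRstripNl (cs : List Char) : List Char := (cs.reverse.dropWhile (· == '\n')).reverse

-- ===== PORT A =====
-- A's while loop over lines with state (skip_continuation, new_lines); new_lines kept reversed.
def pvLoopA (attr : List Char) : List (List Char) → Bool → List (List Char) → List (List Char)
  | [], _, acc => acc.reverse
  | line :: rest, skip, acc =>
    if skip && PySem.Chars.startswith line [' ', ' ', ' '] then
      pvLoopA attr rest true acc
    else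
      let stripped := PySem.Chars.lstrip line
      if PySem.Chars.startswith line [' ', ' '] && !PySem.Chars.startswith line [' ', ' ', ' ']
          && PySem.Chars.startswith stripped (attr ++ [':'])
          && !PySem.Chars.startswith stripped (attr ++ ['s', ':']) then
        pvLoopA attr rest true acc
      else
        pvLoopA attr rest false (line :: acc)

def remove_recurrence_sub_attr (content : String) (attr_name : String) : String :=
  let lines := PySem.Chars.splitOn (pvRstripNl content.toList) ['\n']
  String.ofList (PySem.Chars.join ['\n'] (pvLoopA attr_name.toList lines false []) ++ ['\n'])

-- ===== PORT B =====
-- B's helpers: continuation test and header test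
def pvCont (line : List Char) : Bool := PySem.Chars.startswith line [' ', ' ', ' ']

def pvIsHeader (attr line : List Char) : Bool :=
  let stripped := PySem.Chars.lstrip line
  PySem.Chars.startswith line [' ', ' '] && !pvCont line
    && PySem.Chars.startswith stripped (attr ++ [':'])
    && !PySem.Chars.startswith stripped (attr ++ ['s', ':'])

-- B's grouping loop body; the block list is kept reversed (head = Python's blocks[-1])
def pvChunkStep (blocks : List (List (List Char))) (line : List Char) : List (List (List Char)) :=
  if pvCont line then
    match blocks with
    | b :: bs => (b ++ [line]) :: bs
    | [] => [[line]]
  else [line] :: blocks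

-- B's filter predicate: keep a block unless it is nonempty and headed by the attribute
def pvKeep (attr : List Char) (b : List (List Char)) : Bool :=
  match b with
  | [] => true
  | h :: _ => !pvIsHeader attr h

def remove_recurrence_sub_attr_alt (content : String) (attr_name : String) : String :=
  let lines := PySem.Chars.splitOn (pvRstripNl content.toList) ['\n']
  let blocks := (lines.foldl pvChunkStep [[]]).reverse
  let kept := blocks.filter (pvKeep attr_name.toList)
  String.ofList (PySem.Chars.join ['\n'] kept.flatten ++ ['\n'])

-- ===== PRECONDITION & SPEC =====
def Spec_remove_recurrence_sub_attr (content : String) (attr_name : String) (out : String) : Prop := out = remove_recurrence_sub_attr_alt content attr_name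
instance (content : String) (attr_name : String) (out : String) : Decidable (Spec_remove_recurrence_sub_attr content attr_name out) := by unfold Spec_remove_recurrence_sub_attr; infer_instance

-- ===== CLAIM =====
def Claim_equal_remove_recurrence_sub_attr : Prop := ∀ (content : String) (attr_name : String), Dom_remove_recurrence_sub_attr content attr_name → Spec_remove_recurrence_sub_attr content attr_name (remove_recurrence_sub_attr content attr_name)

-- ===== LEMMAS AND PROOFS =====

-- a continuation line is never a header
theorem pvCont_not_header (attr line : List Char) (h : pvCont line = true) :
    pvIsHeader attr line = false := by
  simp [pvIsHeader, h]

theorem pvTakeDropNil (p : List Char → Bool) : ∀ (l : List (List Char)),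
    (l.dropWhile p).takeWhile p = []
  | [] => rfl
  | x :: xs => by
    by_cases h : p x = true
    · rw [List.dropWhile_cons_of_pos h]; exact pvTakeDropNil p xs
    · rw [List.dropWhile_cons_of_neg (by simp [h]), List.takeWhile_cons_of_neg (by simp [h])]

-- specification-side chunking: head line plus its run of continuation lines
def pvChunksAux : List (List Char) → List (List (List Char))
  | [] => []
  | l :: r => (l :: r.takeWhile pvCont) :: pvChunksAux (r.dropWhile pvCont)
  termination_by ls => ls.length
  decreasing_by exact Nat.lt_succ_of_le (List.length_dropWhile_le _ _)

theorem pvChunksAux_nil : pvChunksAux [] = [] := by rw [pvChunksAux]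
theorem pvChunksAux_cons (l : List Char) (r : List (List Char)) :
    pvChunksAux (l :: r) = (l :: r.takeWhile pvCont) :: pvChunksAux (r.dropWhile pvCont) := by
  rw [pvChunksAux]

-- the foldl grouping equals pvChunksAux plus the headless leading block
theorem pvFoldl_chunk : ∀ (ls : List (List Char)) (b : List (List Char)) (bs : List (List (List Char))),
    ls.foldl pvChunkStep (b :: bs) =
      (pvChunksAux (ls.dropWhile pvCont)).reverse ++ (b ++ ls.takeWhile pvCont) :: bs := by
  intro ls
  induction ls with
  | nil => intro b bs; simp [pvChunksAux]
  | cons l r ih =>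
    intro b bs
    by_cases hc : pvCont l = true
    · simp only [List.foldl_cons, pvChunkStep, if_pos hc, List.takeWhile_cons_of_pos hc,
        List.dropWhile_cons_of_pos hc, ih]
      simp
    · have hc' : pvCont l = false := by simpa using hc
      simp only [List.foldl_cons, pvChunkStep, if_neg hc, ih]
      rw [List.takeWhile_cons_of_neg (show ¬ pvCont l = true by simp [hc']),
        List.dropWhile_cons_of_neg (show ¬ pvCont l = true by simp [hc']), pvChunksAux_cons]
      simp

-- the reference output of both programs
def pvOut (attr : List Char) : List (List Char) → List (List Char)
  | [] => []
  | l :: r =>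
    if pvCont l then l :: pvOut attr r
    else if pvIsHeader attr l then pvOut attr (r.dropWhile pvCont)
    else l :: pvOut attr r
  termination_by ls => ls.length
  decreasing_by
  all_goals first
    | exact Nat.lt_succ_self _
    | exact Nat.lt_succ_of_le (List.length_dropWhile_le _ _)

theorem pvOut_nil (attr : List Char) : pvOut attr [] = [] := by rw [pvOut]
theorem pvOut_cons (attr l : List Char) (r : List (List Char)) :
    pvOut attr (l :: r) =
      if pvCont l then l :: pvOut attr r
      else if pvIsHeader attr l then pvOut attr (r.dropWhile pvCont)
      else l :: pvOut attr r := by rw [pvOut]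

-- A's true state = skip the continuation run, then the false state
theorem pvLoopA_true (attr : List Char) : ∀ (ls : List (List Char)) (acc : List (List Char)),
    pvLoopA attr ls true acc = pvLoopA attr (ls.dropWhile pvCont) false acc := by
  intro ls
  induction ls with
  | nil => intro acc; simp [pvLoopA]
  | cons l r ih =>
    intro acc
    by_cases hc : pvCont l = true
    · rw [pvLoopA, if_pos (by simp [pvCont] at hc ⊢; exact hc), ih,
        List.dropWhile_cons_of_pos hc]
    · have hc' : pvCont l = false := by simpa using hc
      rw [List.dropWhile_cons_of_neg (by simp [hc'])]
      rw [pvLoopA, pvLoopA]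
      have : PySem.Chars.startswith l [' ', ' ', ' '] = false := hc'
      simp [this]

-- A's false state computes pvOut
theorem pvLoopA_eq_out (attr : List Char) : ∀ (n : Nat) (ls : List (List Char)) (acc : List (List Char)),
    ls.length ≤ n → pvLoopA attr ls false acc = acc.reverse ++ pvOut attr ls := by
  intro n
  induction n with
  | zero =>
    intro ls acc h
    have : ls = [] := List.eq_nil_of_length_eq_zero (Nat.le_zero.mp h)
    subst this; simp [pvLoopA, pvOut_nil]
  | succ n ih =>
    intro ls acc h
    match ls with
    | [] => simp [pvLoopA, pvOut_nil]
    | l :: r =>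
      have hr : r.length ≤ n := Nat.lt_succ_iff.mp (by simpa using h)
      rw [pvLoopA]
      simp only [Bool.false_and, if_neg (by simp : ¬ (false = true))]
      by_cases hh : pvIsHeader attr l = true
      · have hc : pvCont l = false := by
          by_contra hc
          have := pvCont_not_header attr l (by simpa using hc)
          simp [this] at hh
        rw [if_pos (by simpa [pvIsHeader] using hh), pvLoopA_true, pvOut_cons,
          if_neg (by simp [hc]), if_pos hh]
        exact ih _ _ (Nat.le_trans (List.length_dropWhile_le _ _) hr)
      · have hh' : pvIsHeader attr l = false := by simpa using hh
        rw [if_neg (by simpa [pvIsHeader] using hh), ih r (l :: acc) hr]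
        by_cases hc : pvCont l = true
        · rw [pvOut_cons, if_pos hc]; simp
        · rw [pvOut_cons, if_neg (by simpa using hc), if_neg (by simp [hh'])]; simp

-- every element of a pvCont-takeWhile prefix passes pvKeep-flatten unchanged:
-- pvOut equals the flattened filtered chunks
theorem pvKeep_nil (attr : List Char) : pvKeep attr [] = true := rfl

theorem pvKeep_takeWhile (attr : List Char) (r : List (List Char)) :
    pvKeep attr (r.takeWhile pvCont) = true := by
  cases hts : r.takeWhile pvCont with
  | nil => rfl
  | cons t ts =>
    simp [pvKeep, pvCont_not_header attr t (List.mem_takeWhile_imp (hts ▸ List.mem_cons_self))]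

theorem pvOut_eq_chunks (attr : List Char) : ∀ (n : Nat) (ls : List (List Char)), ls.length ≤ n →
    pvOut attr ls =
      (((ls.takeWhile pvCont) :: pvChunksAux (ls.dropWhile pvCont)).filter (pvKeep attr)).flatten := by
  intro n
  induction n with
  | zero =>
    intro ls h
    have : ls = [] := List.eq_nil_of_length_eq_zero (Nat.le_zero.mp h)
    subst this; simp [pvOut_nil, pvChunksAux_nil, pvKeep]
  | succ n ih =>
    intro ls h
    match ls with
    | [] => simp [pvOut_nil, pvChunksAux_nil, pvKeep]
    | l :: r =>
      have hr : r.length ≤ n := Nat.lt_succ_iff.mp (by simpa using h)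
      by_cases hc : pvCont l = true
      · have hkl : pvKeep attr (l :: r.takeWhile pvCont) = true := by
          simp [pvKeep, pvCont_not_header attr l hc]
        rw [pvOut_cons, if_pos hc, List.takeWhile_cons_of_pos hc, List.dropWhile_cons_of_pos hc,
          ih r hr]
        simp [hkl, pvKeep_takeWhile]
      · have hc' : pvCont l = false := by simpa using hc
        rw [List.takeWhile_cons_of_neg (by simp [hc']), List.dropWhile_cons_of_neg (by simp [hc']),
          pvChunksAux_cons]
        by_cases hh : pvIsHeader attr l = true
        · have hkl : pvKeep attr (l :: r.takeWhile pvCont) = false := by simp [pvKeep, hh]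
          rw [pvOut_cons, if_neg (by simp [hc']), if_pos hh,
            ih _ (Nat.le_trans (List.length_dropWhile_le _ _) hr), pvTakeDropNil,
            List.dropWhile_idempotent]
          simp [hkl, pvKeep_nil]
        · have hh' : pvIsHeader attr l = false := by simpa using hh
          have hkl : pvKeep attr (l :: r.takeWhile pvCont) = true := by simp [pvKeep, hh']
          rw [pvOut_cons, if_neg (by simp [hc']), if_neg (by simp [hh']), ih r hr]
          simp [hkl, pvKeep_nil, pvKeep_takeWhile]

theorem pvMain (attr : List Char) (ls : List (List Char)) :
    pvLoopA attr ls false [] = ((ls.foldl pvChunkStep [[]]).reverse.filter (pvKeep attr)).flatten := by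
  rw [pvFoldl_chunk ls [] []]
  rw [pvLoopA_eq_out attr ls.length ls [] (Nat.le_refl _)]
  rw [pvOut_eq_chunks attr ls.length ls (Nat.le_refl _)]
  simp

-- ===== VERDICT =====
theorem remove_recurrence_sub_attr_spec : Claim_equal_remove_recurrence_sub_attr := by
  intro content attr_name _
  unfold Spec_remove_recurrence_sub_attr remove_recurrence_sub_attr remove_recurrence_sub_attr_alt
  simp only [pvMain]
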